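-- pv_equiv track=rewrite | github.com/malikbou/on-premise-slm | src/markdown_conversion/repair_one_shot.py | _table_blocks
-- ===== SOURCE A (Python) =====
-- from typing import List, Tuple
--
-- def _table_blocks(md: str) -> List[List[str]]:
--     """Return list of table blocks (each a list of lines) for GFM tables.
--     Very lightweight detector: consecutive lines starting with '|' and at least
--     one separator line with dashes. Idempotent and tolerant to spacing.
--     """
--     blocks: List[List[str]] = []
--     cur: List[str] = []
--     for line in md.splitlines():
--         if line.strip().startswith("|"):
--             cur.append(line)
--             continue
--         # boundary
--         if cur:
--             # ensure it's a real table (has a separator row with ---)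
--             if any("---" in l for l in cur[:3]):
--                 blocks.append(cur)
--             cur = []
--     if cur:
--         if any("---" in l for l in cur[:3]):
--             blocks.append(cur)
--     return blocks
-- ===== SOURCE B (Python) =====
-- from typing import List
--
--
-- def _table_blocks(md: str) -> List[List[str]]:
--     lines = md.splitlines()
--     # Boundary positions: indices of non-pipe lines, framed by virtual cuts
--     # at -1 (before the text) and len(lines) (after it).  The maximal pipe
--     # runs are exactly the slices strictly between consecutive cuts.
--     cuts = [-1] + [i for i, l in enumerate(lines)
--                    if not l.strip().startswith("|")] + [len(lines)]
--     blocks: List[List[str]] = []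
--     for a, b in zip(cuts, cuts[1:]):
--         run = lines[a + 1 : b]
--         if run and any("---" in l for l in run[:3]):
--             blocks.append(run)
--     return blocks
-- ===== Notes on version B (the rewrite author's own statement) =====
-- stated objective: alternative
-- what changed: Replaces A's single-pass accumulator with its duplicated in-loop/after-loop flush by a staged boundary computation: B collects the indices of non-pipe lines as cut points (framed by -1 and len(lines)), slices each maximal pipe run out from between consecutive cuts, and keeps the nonempty runs whose first three lines contain a dash separator.
import Mathlib
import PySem

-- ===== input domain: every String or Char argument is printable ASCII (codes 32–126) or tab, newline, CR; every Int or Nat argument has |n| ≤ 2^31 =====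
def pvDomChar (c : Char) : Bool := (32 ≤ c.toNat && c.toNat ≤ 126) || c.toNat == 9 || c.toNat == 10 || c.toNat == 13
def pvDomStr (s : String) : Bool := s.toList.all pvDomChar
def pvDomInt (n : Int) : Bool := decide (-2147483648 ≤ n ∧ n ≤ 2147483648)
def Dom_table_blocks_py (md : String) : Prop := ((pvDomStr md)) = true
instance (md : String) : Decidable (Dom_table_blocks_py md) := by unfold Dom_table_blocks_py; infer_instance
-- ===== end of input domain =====

-- B replaces A's streaming accumulator (with its duplicated in-loop/after-loop flush) by a
-- staged boundary computation: it collects the indices of the non-pipe lines as cut points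
-- and slices the maximal pipe runs out from between consecutive cuts; objective: alternative, same cost.


-- ===== PORT A =====
-- line.strip().startswith("|")  (this test appears verbatim in both Pythons)
def tbKey (line : String) : Bool := PySem.Str.startswith (PySem.Str.strip line) "|"

-- any("---" in l for l in r[:3])  (r[:3] is a Python slice; appears verbatim in both Pythons)
def tbSep (r : List String) : Bool :=
  (PySem.List.slice r none (some 3)).any (fun l => PySem.Str.isIn "---" l)

-- loop body of A: the state is (blocks, cur)
def tbStep (st : List (List String) × List String) (line : String) :
    List (List String) × List String :=
  if tbKey line then (st.1, st.2 ++ [line])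
  else if st.2 ≠ [] then ((if tbSep st.2 then st.1 ++ [st.2] else st.1), [])
  else st

def table_blocks_py (md : String) : List (List String) :=
  let st := (PySem.Str.splitlines md).foldl tbStep ([], [])
  if st.2 ≠ [] then (if tbSep st.2 then st.1 ++ [st.2] else st.1) else st.1

-- ===== PORT B =====
-- loop body of B: p = (a, b) is a pair of consecutive cuts, run = lines[a+1:b]
def tbStepB (lines : List String) (blocks : List (List String)) (p : Int × Int) :
    List (List String) :=
  let run := PySem.List.slice lines (some (p.1 + 1)) (some p.2)
  if run ≠ [] ∧ tbSep run then blocks ++ [run] else blocks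

def table_blocks_py_alt (md : String) : List (List String) :=
  let lines := PySem.Str.splitlines md
  let cuts : List Int :=
    [-1] ++ ((PySem.List.enumerate lines).filter (fun p => !tbKey p.2)).map (fun p => p.1)
         ++ [PySem.List.len lines]
  (cuts.zip (PySem.List.slice cuts (some 1) none)).foldl (tbStepB lines) []

-- ===== PRECONDITION & SPEC =====
def Spec_table_blocks_py (md : String) (out : List (List String)) : Prop := out = table_blocks_py_alt md
instance (md : String) (out : List (List String)) : Decidable (Spec_table_blocks_py md out) := by unfold Spec_table_blocks_py; infer_instance

-- ===== CLAIM (what is proved, stated in full; the proofs are below) =====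
def Claim_equal_table_blocks_py : Prop := ∀ (md : String), Dom_table_blocks_py md → Spec_table_blocks_py md (table_blocks_py md)

-- ===== LEMMAS AND PROOFS =====

-- A's final flush, as a function of the loop state
def tbFinish (st : List (List String) × List String) : List (List String) :=
  if st.2 ≠ [] then (if tbSep st.2 then st.1 ++ [st.2] else st.1) else st.1

-- emit a candidate run (both programs keep a run iff nonempty with a dash separator in its head)
def tbEmit (r : List String) : List (List String) :=
  if r ≠ [] ∧ tbSep r then [r] else []

-- B's pieces on a plain line list
def tbFls (ls : List String) : List Int :=
  ((PySem.List.enumerate ls).filter (fun p => !tbKey p.2)).map (fun p => p.1)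
def tbT0 (ls : List String) : List Int := tbFls ls ++ [(ls.length : Int)]
def tbCuts (ls : List String) : List Int := -1 :: tbT0 ls
def tbP (ls : List String) : List (List String) :=
  ((tbCuts ls).zip (tbCuts ls).tail).foldl (tbStepB ls) []
def tbQ (ls : List String) : List (List String) :=
  ((tbT0 ls).zip (tbT0 ls).tail).foldl (tbStepB ls) []
def tbRest (ls : List String) : List (List String) :=
  match ls.dropWhile tbKey with
  | [] => []
  | _ :: r => tbP r

theorem tb_alt_eq (md : String) :
    table_blocks_py_alt md = tbP (PySem.Str.splitlines md) := by
  simp [table_blocks_py_alt, tbP, tbCuts, tbT0, tbFls,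
    PySem.List.slice_from_one, PySem.List.len_eq]

-- enumerate with a shifted start
theorem tb_enumerate_shift (ls : List String) (s : Int) :
    PySem.List.enumerate ls s
      = (PySem.List.enumerate ls).map (fun p => (p.1 + s, p.2)) := by
  induction ls generalizing s with
  | nil => simp [PySem.List.enumerate_nil]
  | cons x xs ih =>
    rw [PySem.List.enumerate_cons, PySem.List.enumerate_cons, ih (s + 1), ih (0 + 1)]
    simp only [List.map_cons, List.map_map, List.cons.injEq]
    refine ⟨by simp, ?_⟩
    exact List.map_congr_left (fun p _ => by simp [Prod.ext_iff]; ring)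

theorem tbFls_cons (x : String) (xs : List String) :
    tbFls (x :: xs)
      = (if tbKey x then [] else [0]) ++ (tbFls xs).map (· + 1) := by
  unfold tbFls
  rw [PySem.List.enumerate_cons, tb_enumerate_shift xs (0 + 1)]
  cases h : tbKey x <;>
    · simp [List.filter_map, List.map_map, h, Function.comp_def]

theorem tbT0_cons (x : String) (xs : List String) :
    tbT0 (x :: xs)
      = (if tbKey x then [] else [0]) ++ (tbT0 xs).map (· + 1) := by
  unfold tbT0
  rw [tbFls_cons]
  cases h : tbKey x <;> simp [h] <;> push_cast <;> ring

theorem tbT0_nat (ls : List String) : ∀ a ∈ tbT0 ls, ∃ k : Nat, a = (k : Int) := by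
  intro a ha
  unfold tbT0 tbFls at ha
  rcases List.mem_append.mp ha with h | h
  · rcases List.mem_map.mp h with ⟨p, hp, rfl⟩
    have hp' := List.mem_of_mem_filter hp
    rcases (PySem.List.mem_enumerate_iff _ _ _).mp hp' with ⟨k, hk, rfl⟩
    exact ⟨k, by simp⟩
  · exact ⟨ls.length, by simpa using h⟩

theorem tbT0_ne_nil (ls : List String) : tbT0 ls ≠ [] := by
  simp [tbT0]

theorem tbT0_head_take (xs : List String) :
    ∃ k : Nat, (tbT0 xs).head? = some (k : Int) ∧ xs.take k = xs.takeWhile tbKey := by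
  induction xs with
  | nil => exact ⟨0, by simp [tbT0, tbFls, PySem.List.enumerate_nil], by simp⟩
  | cons x xs ih =>
    obtain ⟨k, hk, htake⟩ := ih
    cases hx : tbKey x with
    | false =>
      refine ⟨0, ?_, ?_⟩
      · rw [tbT0_cons, if_neg (by simp [hx])]; simp
      · simp [List.takeWhile_cons, hx]
    | true =>
      refine ⟨k + 1, ?_, ?_⟩
      · rw [tbT0_cons, if_pos hx]
        simp only [List.nil_append, List.head?_map, hk, Option.map_some,
          Option.some.injEq]
        push_cast; ring
      · simp [List.takeWhile_cons, hx, List.take_succ_cons, htake]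

-- slice through a cons, natural bounds
theorem tb_slice_cons (x : String) (ls : List String) (i j : Nat) :
    PySem.List.slice (x :: ls) (some ((i : Int) + 1)) (some ((j : Int) + 1))
      = PySem.List.slice ls (some (i : Int)) (some (j : Int)) := by
  have h1 : ((i : Int) + 1) = ((i + 1 : Nat) : Int) := by push_cast; ring
  have h2 : ((j : Int) + 1) = ((j + 1 : Nat) : Int) := by push_cast; ring
  rw [h1, h2, PySem.List.slice_natCast, PySem.List.slice_natCast]
  simp [Nat.succ_sub_succ]

-- folding B's step over shifted pairs on a cons is folding over the originals
theorem tb_fold_shift (x : String) (ls : List String) (ps : List (Int × Int))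
    (blocks : List (List String))
    (h : ∀ p ∈ ps, (∃ i : Nat, p.1 + 1 = (i : Int)) ∧ ∃ j : Nat, p.2 = (j : Int)) :
    (ps.map (fun p => (p.1 + 1, p.2 + 1))).foldl (tbStepB (x :: ls)) blocks
      = ps.foldl (tbStepB ls) blocks := by
  induction ps generalizing blocks with
  | nil => rfl
  | cons p ps ih =>
    obtain ⟨⟨i, hi⟩, ⟨j, hj⟩⟩ := h p (List.mem_cons_self ..)
    have hrun : PySem.List.slice (x :: ls) (some (p.1 + 1 + 1)) (some (p.2 + 1))
        = PySem.List.slice ls (some (p.1 + 1)) (some p.2) := by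
      rw [hi, hj]; exact tb_slice_cons x ls i j
    simp only [List.map_cons, List.foldl_cons, tbStepB, hrun]
    exact ih _ (fun q hq => h q (List.mem_cons_of_mem _ hq))

-- B's fold only appends: the accumulator is a prefix
theorem tb_fold_blocks (ls : List String) (ps : List (Int × Int))
    (blocks : List (List String)) :
    ps.foldl (tbStepB ls) blocks = blocks ++ ps.foldl (tbStepB ls) [] := by
  induction ps generalizing blocks with
  | nil => simp
  | cons p ps ih =>
    simp only [List.foldl_cons, tbStepB]
    split_ifs with h
    · conv_lhs => rw [ih]
      conv_rhs => rw [ih]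
      simp
    · exact ih blocks

theorem tb_map_shift (l : List (Int × Int)) :
    l.map (Prod.map (fun a : Int => a + 1) (fun a : Int => a + 1))
      = l.map (fun p => (p.1 + 1, p.2 + 1)) :=
  List.map_congr_left (fun p _ => by cases p; rfl)

theorem tb_zip_nat (xs : List String) :
    ∀ p ∈ (tbT0 xs).zip (tbT0 xs).tail,
      (∃ i : Nat, p.1 + 1 = (i : Int)) ∧ ∃ j : Nat, p.2 = (j : Int) := by
  intro p hp
  obtain ⟨h1, h2⟩ := List.of_mem_zip hp
  obtain ⟨i, hi⟩ := tbT0_nat xs p.1 h1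
  obtain ⟨j, hj⟩ := tbT0_nat xs p.2 (List.mem_of_mem_tail h2)
  exact ⟨⟨i + 1, by rw [hi]; push_cast; ring⟩, j, hj⟩

theorem tb_zip_nat_cuts (xs : List String) :
    ∀ p ∈ (tbCuts xs).zip (tbCuts xs).tail,
      (∃ i : Nat, p.1 + 1 = (i : Int)) ∧ ∃ j : Nat, p.2 = (j : Int) := by
  intro p hp
  obtain ⟨h1, h2⟩ := List.of_mem_zip hp
  have h2' : p.2 ∈ tbT0 xs := by
    simpa [tbCuts] using h2
  refine ⟨?_, tbT0_nat xs p.2 h2'⟩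
  have h1' : p.1 = -1 ∨ p.1 ∈ tbT0 xs := by
    simpa [tbCuts] using h1
  rcases h1' with h | h
  · exact ⟨0, by rw [h]; ring⟩
  · obtain ⟨i, hi⟩ := tbT0_nat xs p.1 h
    exact ⟨i + 1, by rw [hi]; push_cast; ring⟩

theorem tbQ_cons_true (x : String) (xs : List String) (hx : tbKey x = true) :
    tbQ (x :: xs) = tbQ xs := by
  unfold tbQ
  rw [tbT0_cons, if_pos hx]
  simp only [List.nil_append]
  rw [← List.map_tail, List.zip_map, tb_map_shift,
    tb_fold_shift x xs _ [] (tb_zip_nat xs)]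

theorem tbQ_cons_false (x : String) (xs : List String) (hx : tbKey x = false) :
    tbQ (x :: xs) = tbP xs := by
  unfold tbQ tbP
  rw [tbT0_cons, if_neg (by simp [hx])]
  simp only [List.singleton_append]
  have h0 : (0 : Int) :: (tbT0 xs).map (· + 1) = (tbCuts xs).map (· + 1) := by
    simp [tbCuts]
  rw [h0, ← List.map_tail, List.zip_map, tb_map_shift,
    tb_fold_shift x xs _ [] (tb_zip_nat_cuts xs)]

theorem tbP_cons_false (x : String) (xs : List String) (hx : tbKey x = false) :
    tbP (x :: xs) = tbP xs := by
  have ht : tbT0 (x :: xs) = (0 : Int) :: (tbT0 xs).map (· + 1) := by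
    rw [tbT0_cons, if_neg (by simp [hx])]; simp
  have hq := tbQ_cons_false x xs hx
  unfold tbQ at hq
  rw [ht] at hq
  simp only [List.tail_cons] at hq
  unfold tbP
  rw [show tbCuts (x :: xs) = -1 :: (0 : Int) :: (tbT0 xs).map (· + 1) by
    rw [tbCuts, ht]]
  simp only [List.tail_cons, List.zip_cons_cons, List.foldl_cons]
  have hstep : tbStepB (x :: xs) [] (-1, 0) = [] := by
    simp [tbStepB, pysem]
  rw [hstep]
  exact hq

theorem tbP_cons_true (x : String) (xs : List String) (hx : tbKey x = true) :
    tbP (x :: xs) = tbEmit (x :: xs.takeWhile tbKey) ++ tbQ xs := by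
  obtain ⟨k, hk, htake⟩ := tbT0_head_take xs
  obtain ⟨c, r, hcr⟩ : ∃ c r, tbT0 xs = c :: r := by
    cases h : tbT0 xs with
    | nil => exact absurd h (tbT0_ne_nil xs)
    | cons c r => exact ⟨c, r, rfl⟩
  have hc : c = (k : Int) := by
    rw [hcr] at hk; simpa using hk
  have ht : tbT0 (x :: xs) = ((k : Int) + 1) :: r.map (· + 1) := by
    rw [tbT0_cons, if_pos hx]
    simp [hcr, hc]
  unfold tbP
  rw [show tbCuts (x :: xs) = -1 :: ((k : Int) + 1) :: r.map (· + 1) by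
    rw [tbCuts, ht]]
  simp only [List.tail_cons, List.zip_cons_cons, List.foldl_cons]
  have hrun : PySem.List.slice (x :: xs) (some ((-1 : Int) + 1)) (some ((k : Int) + 1))
      = x :: xs.takeWhile tbKey := by
    rw [show ((-1 : Int) + 1) = ((0 : Nat) : Int) by ring,
      show ((k : Int) + 1) = ((k + 1 : Nat) : Int) by push_cast; ring,
      PySem.List.slice_natCast]
    simp [List.take_succ_cons, htake]
  have hstep : tbStepB (x :: xs) [] (-1, (k : Int) + 1)
      = tbEmit (x :: xs.takeWhile tbKey) := by
    simp only [tbStepB, tbEmit, hrun, List.nil_append]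
  rw [hstep]
  have hmap : ((k : Int) + 1) :: r.map (· + 1) = (tbT0 xs).map (· + 1) := by
    rw [hcr, hc]; rfl
  rw [hmap, show r.map (· + 1) = ((tbT0 xs).tail).map (· + 1) by
      rw [hcr, List.tail_cons],
    List.zip_map, tb_map_shift,
    tb_fold_shift x xs _ _ (tb_zip_nat xs), tb_fold_blocks]
  rfl

theorem tbQ_eq_rest (ls : List String) : tbQ ls = tbRest ls := by
  induction ls with
  | nil => rfl
  | cons x xs ih =>
    cases hx : tbKey x with
    | true => rw [tbQ_cons_true x xs hx, ih]; simp [tbRest, hx]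
    | false => rw [tbQ_cons_false x xs hx]; simp [tbRest, hx]

theorem tbP_unfold (ls : List String) :
    tbP ls = tbEmit (ls.takeWhile tbKey) ++ tbRest ls := by
  cases ls with
  | nil => rfl
  | cons x xs =>
    cases hx : tbKey x with
    | true =>
      rw [tbP_cons_true x xs hx, tbQ_eq_rest]
      simp [List.takeWhile_cons, List.dropWhile_cons, hx, tbRest]
    | false =>
      rw [tbP_cons_false x xs hx]
      simp [List.takeWhile_cons, hx, tbRest, tbEmit]

-- A's loop computes B's staged result
theorem tb_main (ls : List String) (blocks : List (List String)) (cur : List String) :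
    tbFinish (ls.foldl tbStep (blocks, cur))
      = blocks ++ tbEmit (cur ++ ls.takeWhile tbKey) ++ tbRest ls := by
  induction ls generalizing blocks cur with
  | nil =>
    simp only [List.foldl_nil, tbFinish, tbEmit, tbRest, List.takeWhile_nil,
      List.dropWhile_nil, List.append_nil]
    split_ifs with h1 h2 <;> simp_all
  | cons x xs ih =>
    cases hx : tbKey x with
    | true =>
      simp only [List.foldl_cons, tbStep, hx, if_pos]
      rw [ih, List.takeWhile_cons_of_pos (by simp [hx])]
      simp [tbRest, hx]
    | false =>
      have hstate : tbStep (blocks, cur) x = (blocks ++ tbEmit cur, []) := by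
        simp only [tbStep, hx, Bool.false_eq_true, if_false, tbEmit]
        by_cases hc : cur = [] <;> split_ifs <;> simp_all
      simp only [List.foldl_cons, hstate]
      rw [ih, List.takeWhile_cons_of_neg (by simp [hx])]
      simp only [List.append_nil, List.nil_append]
      rw [List.append_assoc, ← tbP_unfold xs]
      simp [tbRest, hx, List.append_assoc]

-- ===== VERDICT (by name: the statement is the Claim_ definition above) =====
theorem table_blocks_py_spec : Claim_equal_table_blocks_py := by
  intro md _
  unfold Spec_table_blocks_py table_blocks_py
  rw [tb_alt_eq]
  have := tb_main (PySem.Str.splitlines md) [] []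
  simpa [tbFinish, tbP_unfold, tbEmit] using this
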